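-- pv_equiv track=rewrite | github.com/wagnerhelio/Visary | scripts/add_ref_ids_to_seeds.py | _add_ref_ids_for_form
-- ===== SOURCE A (Python) =====
-- from collections import defaultdict
--
-- def _add_ref_ids_for_form(form_item: dict) -> bool:
--     changed = False
--     counters: dict[int, int] = defaultdict(int)
--
--     for q in form_item.get("perguntas", []):
--         stage = q.get("etapa")
--         try:
--             stage_int = int(stage) if stage is not None else None
--         except (TypeError, ValueError):
--             stage_int = None
--
--         if stage_int is None:
--             continue
--
--         counters[stage_int] += 1
--         if q.get("ref_id"):
--             continue
--
--         q["ref_id"] = f"{stage_int}.{counters[stage_int]}"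
--         changed = True
--
--     return changed
-- ===== SOURCE B (Python) =====
-- def _add_ref_ids_for_form(form_item: dict) -> bool:
--     # Two-pass decomposition: group questions by parsed stage first (in
--     # appearance order), then number each group with a 1-based index.
--     # Mutates the question dicts in place exactly like the original.
--     groups: dict[int, list] = {}
--     for q in form_item.get("perguntas", []):
--         stage = q.get("etapa")
--         try:
--             stage_int = int(stage) if stage is not None else None
--         except (TypeError, ValueError):
--             stage_int = None
--         if stage_int is not None:
--             groups.setdefault(stage_int, []).append(q)
--
--     changed = False
--     for stage_int, qs in groups.items():
--         for i, q in enumerate(qs, start=1):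
--             if not q.get("ref_id"):
--                 q["ref_id"] = f"{stage_int}.{i}"
--                 changed = True
--     return changed
-- ===== Notes on version B (the rewrite author's own statement) =====
-- stated objective: alternative
-- what changed: Replaces the single interleaved scan with per-stage counters by a two-pass decomposition: first group all valid-stage questions into a stage->questions dict, then number each group with a 1-based enumerate and assign missing ref_ids.
import Mathlib
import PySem

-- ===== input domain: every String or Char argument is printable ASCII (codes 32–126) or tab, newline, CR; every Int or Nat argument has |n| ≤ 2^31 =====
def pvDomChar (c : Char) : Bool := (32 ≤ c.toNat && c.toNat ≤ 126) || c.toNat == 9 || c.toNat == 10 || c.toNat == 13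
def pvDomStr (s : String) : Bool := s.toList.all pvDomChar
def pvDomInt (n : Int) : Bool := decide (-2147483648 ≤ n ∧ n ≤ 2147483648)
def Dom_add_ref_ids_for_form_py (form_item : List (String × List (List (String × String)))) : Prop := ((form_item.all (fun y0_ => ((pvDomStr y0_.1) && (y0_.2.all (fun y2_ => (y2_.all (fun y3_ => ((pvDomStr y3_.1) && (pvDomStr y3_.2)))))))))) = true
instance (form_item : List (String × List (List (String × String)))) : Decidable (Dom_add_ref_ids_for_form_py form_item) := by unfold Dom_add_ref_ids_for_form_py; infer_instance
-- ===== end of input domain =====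

-- B replaces A's single interleaved scan (per-stage counters maintained while assigning)
-- by a two-pass decomposition: group questions by parsed stage, then number each group.
-- Both Pythons mutate the question dicts identically; the equivalence proved here is about
-- the returned Bool (the mutation is not representable in the pure ports).

-- shared parse of q.get("etapa") through int(...)/except, identical snippet in both Pythons
def pvStage (q : List (String × String)) : Option Int :=
  match (PySem.Dict.mk q).get? "etapa" with
  | none => none
  | some s => PySem.Int.ofStr? s

-- truthiness of q.get("ref_id") (None or "" are falsy)
def pvRefTruthy (q : List (String × String)) : Bool :=
  match (PySem.Dict.mk q).get? "ref_id" with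
  | none => false
  | some s => s ≠ ""

-- ===== PORT A =====
def add_ref_ids_for_form_py (form_item : List (String × List (List (String × String)))) : Bool :=
  let perguntas := (PySem.Dict.mk form_item).getD "perguntas" []
  (perguntas.foldl (fun (st : Bool × PySem.Dict Int Int) q =>
      match pvStage q with
      | none => st                               -- continue
      | some si =>
        let counters := st.2.modify si 0 (· + 1) -- counters[stage_int] += 1
        if pvRefTruthy q then (st.1, counters)   -- continue
        else (true, counters))                   -- q["ref_id"] = … (in-place mutation), changed = True
    (false, PySem.Dict.mk [])).1

-- ===== PORT B =====
def add_ref_ids_for_form_py_alt (form_item : List (String × List (List (String × String)))) : Bool :=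
  let perguntas := (PySem.Dict.mk form_item).getD "perguntas" []
  -- pass 1: groups.setdefault(stage_int, []).append(q)
  let groups : PySem.Dict Int (List (List (String × String))) :=
    perguntas.foldl (fun g q =>
      match pvStage q with
      | none => g
      | some si => g.modify si [] (· ++ [q])) (PySem.Dict.mk [])
  -- pass 2: per group, enumerate(qs, start=1); the Int component mirrors the index i
  groups.items.foldl (fun changed e =>
    (e.2.foldl (fun (st : Bool × Int) q =>
        if pvRefTruthy q then (st.1, st.2 + 1)
        else (true, st.2 + 1))                   -- q["ref_id"] = f"{stage}.{i}" (mutation), changed = True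
      (changed, 1)).1) false

-- ===== PRECONDITION & SPEC =====
def Spec_add_ref_ids_for_form_py (form_item : List (String × List (List (String × String)))) (out : Bool) : Prop := out = add_ref_ids_for_form_py_alt form_item
instance (form_item : List (String × List (List (String × String)))) (out : Bool) : Decidable (Spec_add_ref_ids_for_form_py form_item out) := by unfold Spec_add_ref_ids_for_form_py; infer_instance

-- ===== CLAIM (what is proved, stated in full; the proofs are below) =====
def Claim_equal_add_ref_ids_for_form_py : Prop := ∀ (form_item : List (String × List (List (String × String)))), Dom_add_ref_ids_for_form_py form_item → Spec_add_ref_ids_for_form_py form_item (add_ref_ids_for_form_py form_item)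

-- ===== LEMMAS AND PROOFS =====

-- "this question makes changed become True": valid stage and no truthy ref_id
def pvHit (q : List (String × String)) : Bool := (pvStage q).isSome && !pvRefTruthy q
def pvKey (q : List (String × String)) : Int := (pvStage q).getD 0

lemma loopA (l : List (List (String × String))) (c : Bool) (d : PySem.Dict Int Int) :
    (l.foldl (fun (st : Bool × PySem.Dict Int Int) q =>
      match pvStage q with
      | none => st
      | some si =>
        let counters := st.2.modify si 0 (· + 1)
        if pvRefTruthy q then (st.1, counters)
        else (true, counters)) (c, d)).1 = (c || l.any pvHit) := by
  induction l generalizing c d with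
  | nil => simp
  | cons q l ih =>
    simp only [List.foldl_cons, List.any_cons]
    cases hs : pvStage q with
    | none => simp [hs, ih, pvHit]
    | some si =>
      cases hr : pvRefTruthy q <;>
        simp [hs, hr, ih, pvHit]

lemma loopB_inner (qs : List (List (String × String))) (c : Bool) (i : Int) :
    (qs.foldl (fun (st : Bool × Int) q =>
        if pvRefTruthy q then (st.1, st.2 + 1)
        else (true, st.2 + 1)) (c, i)).1 = (c || qs.any (fun q => !pvRefTruthy q)) := by
  induction qs generalizing c i with
  | nil => simp
  | cons q qs ih =>
    cases hr : pvRefTruthy q <;> simp [hr, ih]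

lemma pvFoldlOr {α : Type} (f : α → Bool) (l : List α) (c : Bool) :
    l.foldl (fun b x => b || f x) c = (c || l.any f) := by
  induction l generalizing c with
  | nil => simp
  | cons x l ih => simp [ih, Bool.or_assoc]

lemma loopB_outer (es : List (Int × List (List (String × String)))) (c : Bool) :
    (es.foldl (fun changed e =>
      (e.2.foldl (fun (st : Bool × Int) q =>
          if pvRefTruthy q then (st.1, st.2 + 1)
          else (true, st.2 + 1)) (changed, 1)).1) c)
    = (c || es.any (fun e => e.2.any (fun q => !pvRefTruthy q))) := by
  simp only [loopB_inner]
  exact pvFoldlOr _ es c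

-- pass 1 equals the same fold restricted to the questions whose stage parses
lemma fp_eq (l : List (List (String × String)))
    (g : PySem.Dict Int (List (List (String × String)))) :
    l.foldl (fun g q =>
      match pvStage q with
      | none => g
      | some si => g.modify si [] (· ++ [q])) g
    = (l.filter (fun q => (pvStage q).isSome)).foldl
        (fun d q => d.modify (pvKey q) [] (· ++ [q])) g := by
  induction l generalizing g with
  | nil => rfl
  | cons q l ih =>
    cases hs : pvStage q with
    | none => simp [List.foldl_cons, hs, ih]
    | some si => simp [List.foldl_cons, hs, ih, pvKey]

-- the grouped dict, looked up: group c is exactly the valid-stage questions with key c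
lemma groups_getD (l' : List (List (String × String))) (c : Int) :
    ((l'.foldl (fun d q => d.modify (pvKey q) [] (· ++ [q]))
        (PySem.Dict.mk [])).getD c [])
    = l'.filter (fun q => pvKey q == c) := by
  have h := PySem.Dict.getD_foldl_modify_append
      (l'.map (fun q => (pvKey q, q))) (PySem.Dict.mk []) c
  rw [List.foldl_map] at h
  rw [h]
  simp [List.filter_map, List.map_map, Function.comp_def]
  rfl

lemma groups_keys (l' : List (List (String × String))) :
    ((l'.foldl (fun d q => d.modify (pvKey q) [] (· ++ [q]))
        (PySem.Dict.mk []))).keys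
    = PySem.Set.ofList (l'.map pvKey) := by
  have h := PySem.Dict.keys_foldl_modify_key l' pvKey []
      (fun _ q v => v ++ [q]) (PySem.Dict.mk [])
  simpa [PySem.Set.update_nil_left, PySem.Dict.keys] using h

lemma groups_keys_nodup (l' : List (List (String × String))) :
    ((l'.foldl (fun d q => d.modify (pvKey q) [] (· ++ [q]))
        (PySem.Dict.mk []))).keys.Nodup := by
  have h := PySem.Dict.nodup_keys_foldl_modify_key l' pvKey []
      (fun _ q v => v ++ [q]) (PySem.Dict.mk []) (by simp [PySem.Dict.keys])
  simpa using h

-- any over the grouped items = any over the valid-stage questions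
lemma groups_any (l' : List (List (String × String))) :
    ((l'.foldl (fun d q => d.modify (pvKey q) [] (· ++ [q]))
        (PySem.Dict.mk []))).items.any (fun e => e.2.any (fun q => !pvRefTruthy q))
    = l'.any (fun q => !pvRefTruthy q) := by
  rw [PySem.Dict.items_eq_map_keys _ (groups_keys_nodup l') [], List.any_map]
  rw [Bool.eq_iff_iff]
  simp only [Function.comp, groups_getD, groups_keys, List.any_eq_true,
    PySem.Set.mem_ofList, List.mem_map, List.any_filter]
  constructor
  · rintro ⟨k, -, q, hq, hf⟩
    simp only [Bool.and_eq_true] at hf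
    exact ⟨q, hq, hf.2⟩
  · rintro ⟨q, hq, hf⟩
    exact ⟨pvKey q, ⟨q, hq, rfl⟩, q, hq, by simp [hf]⟩

-- ===== VERDICT (by name: the statement is the Claim_ definition above) =====
theorem add_ref_ids_for_form_py_spec : Claim_equal_add_ref_ids_for_form_py := by
  intro form_item _
  simp only [Spec_add_ref_ids_for_form_py, add_ref_ids_for_form_py,
    add_ref_ids_for_form_py_alt]
  rw [loopA, fp_eq, loopB_outer, groups_any, List.any_filter]
  rfl
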